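-- pv_equiv track=rewrite | github.com/OliviaBerggren/Project-BINP29 | project.py | create_codon_dict
-- ===== SOURCE A (Python) =====
-- def create_codon_dict(seq):
--     gen_code = ['TTT','TTC','TTA','TTG','TCT','TCC','TCA','TCG','TAT','TAC', 'TAA', 'TAG', 'TGA'
--     ,'TGT','TGC','TGG','CTT','CTC','CTA','CTG','CCT','CCC','CCA','CCG',
--     'CAT','CAC','CAA','CAG','CGT','CGC','CGA','CGG','ATT','ATC','ATA','ATG','ACT',
--     'ACC','ACA','ACG','AAT','AAC','AAA','AAG','AGT','AGC','AGA','AGG','GTT','GTC',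
--     'GTA','GTG','GCT','GCC','GCA','GCG','GAT','GAC','GAA','GAG','GGT','GGC','GGA','GGG']
--     stop_codons = ['TAA', 'TGA', 'TAG']
--     codon_dict={}
--     for codon in gen_code:
--         if not codon in stop_codons:
--             codon_dict[codon] = 0
--     for sequence in seq:
--         for i in range(0,len(sequence),3):
--             codon = sequence[i:i+3]
--             if not len(codon)%3 == 0:
--                 continue
--             else:
--                 if not codon in stop_codons:
--                     codon_dict[codon] +=1
--     print (codon_dict)
--     return codon_dict
-- ===== SOURCE B (Python) =====
-- def create_codon_dict(seq):
--     stop_codons = ['TAA', 'TGA', 'TAG']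
--     chunks = [s[i:i+3] for s in seq for i in range(0, len(s) - 2, 3)]
--     codon_dict = {b1 + b2 + b3: chunks.count(b1 + b2 + b3)
--                   for b1 in 'TCAG' for b2 in 'TCAG' for b3 in 'TCAG'
--                   if b1 + b2 + b3 not in stop_codons}
--     print(codon_dict)
--     return codon_dict
-- ===== Notes on version B (the rewrite author's own statement) =====
-- stated objective: alternative
-- what changed: B collects every full 3-aligned chunk of all sequences into one list and builds the result as a dict comprehension over the 4x4x4 codon product mapping each of the 61 non-stop codons to its count in that list, instead of A's fused loop that increments dict entries chunk by chunk.
-- crash fix: On inputs where some 3-aligned full 3-character chunk is not one of the 64 ACGT codons, A raises KeyError (codon_dict[codon] += 1 on a missing key) while B returns the dict counting only the recognised non-stop codons. — e.g. on create_codon_dict(["TTN"]): A raises KeyError, B returns [("TTT", 0), ("TTC", 0), ("TTA", 0), ("TTG", 0), ("TCT", 0), ("TCC", 0), ("TCA", 0), ("TCG", 0), ("TAT", 0), ("TAC", 0)…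
import Mathlib
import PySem

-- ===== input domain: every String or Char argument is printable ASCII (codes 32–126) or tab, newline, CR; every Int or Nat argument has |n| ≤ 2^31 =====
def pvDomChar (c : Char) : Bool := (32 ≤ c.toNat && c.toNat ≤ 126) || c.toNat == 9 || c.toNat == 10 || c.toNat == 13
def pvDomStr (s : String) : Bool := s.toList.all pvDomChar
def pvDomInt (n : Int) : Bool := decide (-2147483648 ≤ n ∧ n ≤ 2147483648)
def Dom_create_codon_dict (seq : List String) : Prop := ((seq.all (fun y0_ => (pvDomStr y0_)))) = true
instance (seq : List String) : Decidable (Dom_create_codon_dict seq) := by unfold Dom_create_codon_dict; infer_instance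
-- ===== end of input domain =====

-- B replaces A's fused increment-per-chunk loop by collecting the full codon chunks once and building the
-- result as a dict comprehension that counts each of the 61 non-stop codons directly ('alternative' objective).
-- Both Pythons print the dict before returning; the equivalence proved here is about the RETURN value only.

-- ===== PORT A =====
def pvStops : List String := ["TAA", "TGA", "TAG"]
def pvGenCode : List String := ["TTT", "TTC", "TTA", "TTG", "TCT", "TCC", "TCA", "TCG", "TAT", "TAC", "TAA", "TAG", "TGA", "TGT", "TGC", "TGG", "CTT", "CTC", "CTA", "CTG", "CCT", "CCC", "CCA", "CCG", "CAT", "CAC", "CAA", "CAG", "CGT", "CGC", "CGA", "CGG", "ATT", "ATC", "ATA", "ATG", "ACT", "ACC", "ACA", "ACG", "AAT", "AAC", "AAA", "AAG", "AGT", "AGC", "AGA", "AGG", "GTT", "GTC", "GTA", "GTG", "GCT", "GCC", "GCA", "GCG", "GAT", "GAC", "GAA", "GAG", "GGT", "GGC", "GGA", "GGG"]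

def create_codon_dict (seq : List String) : List (String × Int) :=
  let codon_dict : PySem.Dict String Int :=
    pvGenCode.foldl (fun d codon =>
      if ¬ (codon ∈ pvStops) then d.insert codon 0 else d) PySem.Dict.empty
  -- 'codon_dict[codon] += 1' raises KeyError when the key is absent; Dict.modify inserts instead —
  -- Pre_create_codon_dict excludes exactly those inputs, so the port is faithful on Pre_.
  let codon_dict :=
    seq.foldl (fun d sequence =>
      (PySem.List.pyRange 0 (PySem.Str.len sequence) 3).foldl (fun d i =>
        let codon := PySem.Str.slice sequence (some i) (some (i + 3))
        if ¬ (PySem.Int.mod (PySem.Str.len codon) 3 = 0) then d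
        else if ¬ (codon ∈ pvStops) then d.modify codon 0 (· + 1) else d) d) codon_dict
  codon_dict.items

-- ===== PORT B =====
def create_codon_dict_alt (seq : List String) : List (String × Int) :=
  let chunks : List String := seq.flatMap (fun s =>
    (PySem.List.pyRange 0 (PySem.Str.len s - 2) 3).map (fun i =>
      PySem.Str.slice s (some i) (some (i + 3))))
  let codon_dict : PySem.Dict String Int :=
    PySem.Dict.ofList ("TCAG".toList.flatMap (fun b1 => "TCAG".toList.flatMap (fun b2 =>
      "TCAG".toList.filterMap (fun b3 =>
        let c := String.ofList [b1, b2, b3]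
        if ¬ (c ∈ pvStops) then some (c, (chunks.count c : Int)) else none))))
  codon_dict.items

-- ===== PRECONDITION & SPEC =====
-- Pre_ excludes exactly the inputs on which A raises KeyError: some 3-aligned full 3-character chunk
-- of some sequence contains a character outside ACGT (that chunk is then missing from codon_dict).
def Pre_create_codon_dict (seq : List String) : Prop :=
  (seq.all (fun s => (s.toList.take (3 * (s.toList.length / 3))).all
    (fun c => c ∈ (['A', 'C', 'G', 'T'] : List Char)))) = true
instance (seq : List String) : Decidable (Pre_create_codon_dict seq) := by
  unfold Pre_create_codon_dict; infer_instance

def pvWitness_create_codon_dict : List String := ["ATGAAATAA", "GG", "TTTA"]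

-- A raises KeyError whenever a sequence has a 3-aligned full chunk outside the 64 ACGT codons;
-- B returns the dict counting only the recognised non-stop codons there.
def Raises_create_codon_dict (seq : List String) : Prop := ¬ Pre_create_codon_dict seq
instance (seq : List String) : Decidable (Raises_create_codon_dict seq) := by
  unfold Raises_create_codon_dict; infer_instance
def pvRaiseWitness_create_codon_dict : List String := ["TTN"]
def pvRaiseWitnessOut_create_codon_dict : List (String × Int) := [("TTT", 0), ("TTC", 0), ("TTA", 0), ("TTG", 0), ("TCT", 0), ("TCC", 0), ("TCA", 0), ("TCG", 0), ("TAT", 0), ("TAC", 0), ("TGT", 0), ("TGC", 0), ("TGG", 0), ("CTT", 0), ("CTC", 0), ("CTA", 0), ("CTG", 0), ("CCT", 0), ("CCC", 0), ("CCA", 0), ("CCG", 0), ("CAT", 0), ("CAC", 0), ("CAA", 0), ("CAG", 0), ("CGT", 0), ("CGC", 0), ("CGA", 0), ("CGG", 0), ("ATT", 0), ("ATC", 0), ("ATA", 0), ("ATG", 0), ("ACT", 0), ("ACC", 0), ("ACA", 0), ("ACG", 0), ("AAT", 0), ("AAC", 0), ("AAA", 0), ("AAG", 0), ("AGT", 0),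 ("AGC", 0), ("AGA", 0), ("AGG", 0), ("GTT", 0), ("GTC", 0), ("GTA", 0), ("GTG", 0), ("GCT", 0), ("GCC", 0), ("GCA", 0), ("GCG", 0), ("GAT", 0), ("GAC", 0), ("GAA", 0), ("GAG", 0), ("GGT", 0), ("GGC", 0), ("GGA", 0), ("GGG", 0)]

def Spec_create_codon_dict (seq : List String) (out : List (String × Int)) : Prop := out = create_codon_dict_alt seq
instance (seq : List String) (out : List (String × Int)) : Decidable (Spec_create_codon_dict seq out) := by unfold Spec_create_codon_dict; infer_instance

-- ===== CLAIM (what is proved, stated in full; the proofs are below) =====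
def Claim_equal_create_codon_dict : Prop := ∀ (seq : List String), Dom_create_codon_dict seq → Pre_create_codon_dict seq → Spec_create_codon_dict seq (create_codon_dict seq)
def Claim_raises_create_codon_dict : Prop := (∀ (seq : List String), Dom_create_codon_dict seq → Raises_create_codon_dict seq → ¬ Pre_create_codon_dict seq) ∧ (Dom_create_codon_dict (pvRaiseWitness_create_codon_dict) ∧ Raises_create_codon_dict (pvRaiseWitness_create_codon_dict) ∧ create_codon_dict_alt (pvRaiseWitness_create_codon_dict) = pvRaiseWitnessOut_create_codon_dict)

-- ===== LEMMAS AND PROOFS =====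

-- the 61 non-stop codons, in A's (= B's) insertion order
def pvVC : List String := ["TTT", "TTC", "TTA", "TTG", "TCT", "TCC", "TCA", "TCG", "TAT", "TAC", "TGT", "TGC", "TGG", "CTT", "CTC", "CTA", "CTG", "CCT", "CCC", "CCA", "CCG", "CAT", "CAC", "CAA", "CAG", "CGT", "CGC", "CGA", "CGG", "ATT", "ATC", "ATA", "ATG", "ACT", "ACC", "ACA", "ACG", "AAT", "AAC", "AAA", "AAG", "AGT", "AGC", "AGA", "AGG", "GTT", "GTC", "GTA", "GTG", "GCT", "GCC", "GCA", "GCG", "GAT", "GAC", "GAA", "GAG", "GGT", "GGC", "GGA", "GGG"]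

def pvChunk (s : String) (i : Int) : String := PySem.Str.slice s (some i) (some (i + 3))

-- A's inner-loop guard: the chunk is full (length a multiple of 3) and not a stop codon
def pvPA (s : String) (i : Int) : Bool :=
  (PySem.Int.mod (PySem.Str.len (pvChunk s i)) 3 == 0) && !(pvChunk s i ∈ pvStops)

def pvFA (s : String) : List String :=
  ((PySem.List.pyRange 0 (PySem.Str.len s) 3).filter (fun i => pvPA s i)).map (pvChunk s)

def pvChunksA (seq : List String) : List String := seq.flatMap pvFA

def pvFB (s : String) : List String :=
  (PySem.List.pyRange 0 (PySem.Str.len s - 2) 3).map (fun i => PySem.Str.slice s (some i) (some (i + 3)))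

def pvChunksB (seq : List String) : List String := seq.flatMap pvFB

def pvD0 : PySem.Dict String Int :=
  pvGenCode.foldl (fun d codon =>
    if ¬ (codon ∈ pvStops) then d.insert codon 0 else d) PySem.Dict.empty

-- ---- B side: the dict comprehension is the 61 keys mapped to their chunk counts ----

set_option maxRecDepth 10000 in
lemma pv_triple (g : String → Int) :
    ("TCAG".toList.flatMap (fun b1 => "TCAG".toList.flatMap (fun b2 =>
      "TCAG".toList.filterMap (fun b3 =>
        if ¬ (String.ofList [b1, b2, b3] ∈ pvStops) then some (String.ofList [b1, b2, b3], g (String.ofList [b1, b2, b3])) else none))))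
    = pvVC.map (fun c => (c, g c)) := by
  rfl

lemma pv_B_items (chunks : List String) :
    (PySem.Dict.ofList (("TCAG".toList.flatMap (fun b1 => "TCAG".toList.flatMap (fun b2 =>
      "TCAG".toList.filterMap (fun b3 =>
        if ¬ (String.ofList [b1, b2, b3] ∈ pvStops) then
          some (String.ofList [b1, b2, b3], (chunks.count (String.ofList [b1, b2, b3]) : Int))
        else none))))) : PySem.Dict String Int).items
    = pvVC.map (fun c => (c, (chunks.count c : Int))) := by
  rw [pv_triple (fun c => (chunks.count c : Int))]
  set pairs := pvVC.map (fun c => (c, (chunks.count c : Int))) with hp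
  have hkeys : pairs.map Prod.fst = pvVC := by simp [hp, Function.comp_def]
  have hfresh : ∀ a ∈ pairs, (PySem.Dict.empty : PySem.Dict String Int).contains a.1 = false := by
    intro a _; exact PySem.Dict.contains_empty a.1
  have hnd : (pairs.map Prod.fst).Nodup := by rw [hkeys]; decide
  have h := PySem.Dict.items_foldl_insert_fresh pairs Prod.fst Prod.snd PySem.Dict.empty hfresh hnd
  unfold PySem.Dict.ofList PySem.Dict.update
  simpa using h

lemma pv_B_eq (seq : List String) :
    create_codon_dict_alt seq = pvVC.map (fun c => (c, ((pvChunksB seq).count c : Int))) :=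
  pv_B_items (pvChunksB seq)

-- ---- A side: the fused loop is a count over the filtered chunk stream ----

set_option maxRecDepth 10000 in
lemma pv_D0_keys : pvD0.keys = pvVC := by rfl

set_option maxRecDepth 10000 in
lemma pv_D0_getD : ∀ c ∈ pvVC, pvD0.getD c 0 = 0 := by decide

lemma pv_innerA (s : String) (d : PySem.Dict String Int) :
    (PySem.List.pyRange 0 (PySem.Str.len s) 3).foldl (fun d i =>
      let codon := PySem.Str.slice s (some i) (some (i + 3))
      if ¬ (PySem.Int.mod (PySem.Str.len codon) 3 = 0) then d
      else if ¬ (codon ∈ pvStops) then d.modify codon 0 (· + 1) else d) d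
    = (pvFA s).foldl (fun d c => d.modify c 0 (· + 1)) d := by
  have h1 : (PySem.List.pyRange 0 (PySem.Str.len s) 3).foldl (fun d i =>
      let codon := PySem.Str.slice s (some i) (some (i + 3))
      if ¬ (PySem.Int.mod (PySem.Str.len codon) 3 = 0) then d
      else if ¬ (codon ∈ pvStops) then d.modify codon 0 (· + 1) else d) d
    = (PySem.List.pyRange 0 (PySem.Str.len s) 3).foldl (fun d i =>
        if pvPA s i then d.modify (pvChunk s i) 0 (· + 1) else d) d := by
    apply PySem.List.foldl_congr_mem
    intro acc i _
    have hPA : pvPA s i = true ↔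
        (PySem.Int.mod (PySem.Str.len (pvChunk s i)) 3 = 0 ∧ ¬ (pvChunk s i ∈ pvStops)) := by
      simp [pvPA]
    simp only [pvChunk] at hPA
    by_cases hp : pvPA s i = true
    · obtain ⟨h2, h3⟩ := hPA.mp hp
      rw [if_neg (not_not_intro h2), if_pos h3, if_pos hp]
      rfl
    · rw [if_neg hp]
      by_cases h2 : PySem.Int.mod (PySem.Str.len (PySem.Str.slice s (some i) (some (i + 3)))) 3 = 0
      · have h3 : PySem.Str.slice s (some i) (some (i + 3)) ∈ pvStops := by
          by_contra h3
          exact hp (hPA.mpr ⟨h2, h3⟩)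
        rw [if_neg (not_not_intro h2), if_neg (not_not_intro h3)]
      · rw [if_pos h2]
  rw [h1]
  have h2 := PySem.List.foldl_if_eq_foldl_filter (fun i => pvPA s i)
    (fun (d : PySem.Dict String Int) (i : Int) => d.modify (pvChunk s i) 0 (· + 1))
    (PySem.List.pyRange 0 (PySem.Str.len s) 3) d
  rw [pvFA, List.foldl_map]
  exact h2

lemma pv_outerA (F : String → List String) (seq : List String) (d : PySem.Dict String Int) :
    seq.foldl (fun d s => (F s).foldl (fun d c => d.modify c 0 (· + 1)) d) d
    = (seq.flatMap F).foldl (fun d c => d.modify c 0 (· + 1)) d := by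
  induction seq generalizing d with
  | nil => rfl
  | cons s t ih => simp [List.foldl_append, ih]

lemma pv_set_update_of_mem (s : PySem.Set String) (l : List String)
    (h : ∀ x ∈ l, x ∈ s) : PySem.Set.update s l = s := by
  induction l with
  | nil => rfl
  | cons a t ih =>
    have hmem : a ∈ s := h a List.mem_cons_self
    have ha : PySem.Set.add s a = s := by simp [PySem.Set.add, hmem]
    unfold PySem.Set.update at *
    rw [List.foldl_cons, ha]
    exact ih (fun x hx => h x (by simp [hx]))

-- a full 3-aligned ACGT chunk that is not a stop codon is one of the 61 keys
set_option maxRecDepth 10000 in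
lemma pv_mem_VC (a b c : Char) (ha : a ∈ (['A','C','G','T'] : List Char))
    (hb : b ∈ (['A','C','G','T'] : List Char)) (hc : c ∈ (['A','C','G','T'] : List Char))
    (hst : ¬ (String.ofList [a, b, c] ∈ pvStops)) : String.ofList [a, b, c] ∈ pvVC := by
  fin_cases ha <;> fin_cases hb <;> fin_cases hc <;>
    first | (exact absurd (by decide) hst) | decide

lemma pv_chunk_toList (s : String) (j : Nat) :
    (pvChunk s (j : Int)).toList = (s.toList.drop j).take 3 := by
  have h3 : ((j : Int) + 3) = ((j : Int) + ((3 : Nat) : Int)) := by push_cast; ring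
  rw [pvChunk, PySem.Str.toList_slice, PySem.Chars.slice_eq_listSlice, h3,
    PySem.List.slice_natCast_add]

lemma pv_chunksA_mem (seq : List String) (h : Pre_create_codon_dict seq) :
    ∀ c ∈ pvChunksA seq, c ∈ pvVC := by
  have h' : ∀ s ∈ seq, ∀ c ∈ s.toList.take (3 * (s.toList.length / 3)),
      c ∈ (['A', 'C', 'G', 'T'] : List Char) := by
    intro s hs c hc
    have h1 : _ = true := h
    rw [List.all_eq_true] at h1
    have h2 := h1 s hs
    rw [List.all_eq_true] at h2
    exact of_decide_eq_true (h2 c hc)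
  clear h
  intro c hcmem
  rw [pvChunksA, List.mem_flatMap] at hcmem
  obtain ⟨s, hs, hc⟩ := hcmem
  rw [pvFA, List.mem_map] at hc
  obtain ⟨i, hi, rfl⟩ := hc
  rw [List.mem_filter] at hi
  obtain ⟨hir, hiP⟩ := hi
  have hiP' : PySem.Int.mod (PySem.Str.len (pvChunk s i)) 3 = 0 ∧ ¬ (pvChunk s i ∈ pvStops) := by
    simpa [pvPA] using hiP
  obtain ⟨hmod, hstop⟩ := hiP'
  rw [PySem.List.mem_pyRange_iff_of_pos (by norm_num)] at hir
  obtain ⟨hi0, hilt, hidvd⟩ := hir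
  obtain ⟨j, rfl⟩ : ∃ j : Nat, i = (j : Int) := ⟨i.toNat, (Int.toNat_of_nonneg hi0).symm⟩
  set m := s.toList.length with hm
  rw [PySem.Str.len_eq, ← hm] at hilt
  have hjm : j < m := by exact_mod_cast hilt
  have hlen : ((s.toList.drop j).take 3).length = min 3 (m - j) := by simp [hm]
  have hlen3 : ((s.toList.drop j).take 3).length = 3 := by
    rw [PySem.Str.len_eq, pv_chunk_toList, PySem.Int.mod_eq_zero_iff_dvd] at hmod
    rcases hmod with ⟨k, hk⟩
    omega
  have hj3 : j + 3 ≤ 3 * (m / 3) := by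
    rcases hidvd with ⟨k, hk⟩
    have : (j : Int) = 3 * k := by omega
    have h3j : 3 ∣ j := ⟨k.toNat, by omega⟩
    omega
  have hsub : ∀ ch ∈ (s.toList.drop j).take 3, ch ∈ s.toList.take (3 * (m / 3)) := by
    intro ch hch
    have h1 : (s.toList.drop j).take 3 = (s.toList.take (j + 3)).drop j := by
      rw [List.drop_take]; congr 1; omega
    rw [h1] at hch
    have h2 := List.mem_of_mem_drop hch
    have h3 : s.toList.take (j + 3) = (s.toList.take (3 * (m / 3))).take (j + 3) := by
      rw [List.take_take]; congr 1; omega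
    rw [h3] at h2
    exact List.mem_of_mem_take h2
  obtain ⟨a, b, c, habc⟩ : ∃ a b c', (s.toList.drop j).take 3 = [a, b, c'] :=
    List.length_eq_three.mp hlen3
  have hre : pvChunk s (j : Int) = String.ofList [a, b, c] := by
    have hx := pv_chunk_toList s j
    rw [habc] at hx
    rw [← hx, String.ofList_toList]
  rw [hre]
  have hP := h' s hs
  rw [← hm] at hP
  refine pv_mem_VC a b c ?_ ?_ ?_ ?_
  · exact hP a (by rw [habc] at hsub; exact hsub a (by simp))
  · exact hP b (by rw [habc] at hsub; exact hsub b (by simp))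
  · exact hP c (by rw [habc] at hsub; exact hsub c (by simp))
  · rw [← hre]; exact hstop

set_option maxRecDepth 10000 in
lemma pv_A_eq (seq : List String) (h : Pre_create_codon_dict seq) :
    create_codon_dict seq = pvVC.map (fun c => (c, ((pvChunksA seq).count c : Int))) := by
  unfold create_codon_dict
  have hinner : seq.foldl (fun d sequence =>
      (PySem.List.pyRange 0 (PySem.Str.len sequence) 3).foldl (fun d i =>
        let codon := PySem.Str.slice sequence (some i) (some (i + 3))
        if ¬ (PySem.Int.mod (PySem.Str.len codon) 3 = 0) then d
        else if ¬ (codon ∈ pvStops) then d.modify codon 0 (· + 1) else d) d) pvD0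
    = seq.foldl (fun d s => (pvFA s).foldl (fun d c => d.modify c 0 (· + 1)) d) pvD0 := by
    apply PySem.List.foldl_congr_mem
    intro acc s _
    exact pv_innerA s acc
  show (seq.foldl _ pvD0).items = _
  rw [hinner, pv_outerA pvFA seq pvD0]
  show ((pvChunksA seq).foldl (fun d c => d.modify c 0 (· + 1)) pvD0).items
      = pvVC.map (fun c => (c, ((pvChunksA seq).count c : Int)))
  set L := pvChunksA seq with hL
  have hmem := pv_chunksA_mem seq h
  set D := L.foldl (fun d c => d.modify c 0 (· + 1)) pvD0 with hD
  have hkeys : D.keys = pvVC := by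
    rw [hD]
    have hk := PySem.Dict.keys_foldl_modify L (0 : Int) (fun _ _ v => v + 1) pvD0
    rw [hk, pv_D0_keys]
    exact pv_set_update_of_mem pvVC L hmem
  have hnodup : D.keys.Nodup := by rw [hkeys]; decide
  rw [PySem.Dict.items_eq_map_keys D hnodup 0, hkeys]
  apply List.map_congr_left
  intro c hc
  have hg := PySem.Dict.getD_foldl_modify_add_one L pvD0 c
  rw [hD, hg, pv_D0_getD c hc]
  simp

-- ---- the two chunk streams count every non-stop codon alike ----

lemma pv_countP_range (s : String) (c : String) (hc3 : c.toList.length = 3) :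
    (PySem.List.pyRange 0 (PySem.Str.len s) 3).countP (fun i => pvChunk s i == c)
    = (PySem.List.pyRange 0 (PySem.Str.len s - 2) 3).countP (fun i => pvChunk s i == c) := by
  set m := s.toList.length with hm
  rw [PySem.Str.len_eq, ← hm]
  rw [PySem.List.pyRange_of_pos 0 (m : Int) (by norm_num),
      PySem.List.pyRange_of_pos 0 ((m : Int) - 2) (by norm_num)]
  rw [List.countP_map, List.countP_map]
  set kA := (if (0 : Int) < (m : Int) then (((m : Int) - 0 + 3 - 1) / 3).toNat else 0) with hkA
  set kB := (if (0 : Int) < (m : Int) - 2 then (((m : Int) - 2 - 0 + 3 - 1) / 3).toNat else 0) with hkB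
  have hA : kA = (m + 2) / 3 := by rw [hkA]; split_ifs <;> omega
  have hB : kB = m / 3 := by rw [hkB]; split_ifs <;> omega
  rw [hA, hB]
  by_cases h3 : m % 3 = 0
  · have heq : (m + 2) / 3 = m / 3 := by omega
    rw [heq]
  · have hsplit : (m + 2) / 3 = m / 3 + 1 := by omega
    rw [hsplit, List.range_succ, List.countP_append]
    have hq : (fun k : Nat => pvChunk s (0 + 3 * (k : Int)) == c) (m / 3) = false := by
      have hlen : (pvChunk s (0 + 3 * ((m / 3 : Nat) : Int))).toList.length = m % 3 := by
        have hcast : (0 + 3 * ((m / 3 : Nat) : Int)) = ((3 * (m / 3) : Nat) : Int) := by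
          push_cast; ring
        rw [hcast, pv_chunk_toList]
        simp [hm]
        omega
      by_contra hb
      rw [Bool.not_eq_false, beq_iff_eq] at hb
      rw [hb, hc3] at hlen
      omega
    simp [Function.comp] at hq ⊢
    intro x
    exact hq x

lemma pv_count_s (s c : String) (hc3 : c.toList.length = 3) (hcs : ¬ (c ∈ pvStops)) :
    (pvFA s).count c = (pvFB s).count c := by
  have hl : (pvFA s).count c
      = (PySem.List.pyRange 0 (PySem.Str.len s) 3).countP (fun i => pvChunk s i == c) := by
    rw [pvFA, List.count_eq_countP, List.countP_map, List.countP_filter]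
    apply List.countP_congr
    intro i _
    simp only [Function.comp_apply, Bool.and_eq_true]
    constructor
    · rintro ⟨hb, -⟩; exact hb
    · intro hb
      have he : pvChunk s i = c := beq_iff_eq.mp hb
      refine ⟨hb, ?_⟩
      simp [pvPA, he, PySem.Str.len_eq, hc3, hcs]
  have hr : (pvFB s).count c
      = (PySem.List.pyRange 0 (PySem.Str.len s - 2) 3).countP (fun i => pvChunk s i == c) := by
    rw [pvFB, List.count_eq_countP, List.countP_map]
    rfl
  rw [hl, hr, pv_countP_range s c hc3]

lemma pv_counts (seq : List String) (c : String) (hc3 : c.toList.length = 3)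
    (hcs : ¬ (c ∈ pvStops)) : (pvChunksA seq).count c = (pvChunksB seq).count c := by
  induction seq with
  | nil => rfl
  | cons s t ih =>
    have hA : pvChunksA (s :: t) = pvFA s ++ pvChunksA t := by
      simp [pvChunksA, List.flatMap_cons]
    have hB : pvChunksB (s :: t) = pvFB s ++ pvChunksB t := by
      simp [pvChunksB, List.flatMap_cons]
    rw [hA, hB, List.count_append, List.count_append, ih, pv_count_s s c hc3 hcs]

-- ===== VERDICT (by name: the statement is the Claim_ definition above) =====
theorem create_codon_dict_spec : Claim_equal_create_codon_dict := by
  intro seq _ hpre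
  unfold Spec_create_codon_dict
  rw [pv_A_eq seq hpre, pv_B_eq seq]
  apply List.map_congr_left
  intro c hc
  have hc3 : c.toList.length = 3 := by revert c; decide
  have hcs : ¬ (c ∈ pvStops) := by revert c; decide
  rw [pv_counts seq c hc3 hcs]

set_option maxRecDepth 10000 in
theorem create_codon_dict_raises : Claim_raises_create_codon_dict := by
  unfold Claim_raises_create_codon_dict
  exact ⟨fun _ _ h => h, by decide, by decide, by rfl⟩

-- self-check: the raise witness really lies inside the raises region (reads it off the raises theorem)
theorem create_codon_dict_raises_witness :
    Raises_create_codon_dict pvRaiseWitness_create_codon_dict := by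
  have h := create_codon_dict_raises
  unfold Claim_raises_create_codon_dict at h
  exact h.2.2.1
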